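-- pv_equiv track=rewrite | github.com/TrofimovC137/Python3-project-old | BBM/main2.py | Psum
-- ===== SOURCE A (Python) =====
-- def Psum(P):
--     P.sort()
--     result=[]
--     if (len(P)==1):
--         return [0]
--     else:
--         for i in range(2,len(P)+1):
--             result.append(sum(P[:i]))
--         return result
-- ===== SOURCE B (Python) =====
-- def Psum(P):
--     # Note: like A, sorts P in place (same observable mutation).
--     P.sort()
--     if len(P) == 1:
--         return [0]
--     out = []
--     if P:
--         acc = P[0]
--         for x in P[1:]:
--             acc += x
--             out.append(acc)
--     return out
-- ===== Notes on version B (the rewrite author's own statement) =====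
-- stated objective: faster
-- what changed: Replaces the per-prefix re-summation sum(P[:i]) inside the loop by a single running-sum accumulation pass over the sorted list.
import Mathlib
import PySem

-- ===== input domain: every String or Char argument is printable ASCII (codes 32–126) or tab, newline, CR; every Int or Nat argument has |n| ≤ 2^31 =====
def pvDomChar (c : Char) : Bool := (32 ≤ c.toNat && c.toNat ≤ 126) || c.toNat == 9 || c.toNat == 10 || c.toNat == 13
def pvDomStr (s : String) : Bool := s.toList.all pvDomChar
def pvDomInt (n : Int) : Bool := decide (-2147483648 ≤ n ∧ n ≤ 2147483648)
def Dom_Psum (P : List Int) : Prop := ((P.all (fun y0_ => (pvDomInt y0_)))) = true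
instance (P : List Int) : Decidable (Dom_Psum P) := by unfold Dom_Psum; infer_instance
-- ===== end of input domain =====

-- B replaces A's repeated sum(P[:i]) with one running-sum pass over the sorted list (asymptotically faster).
-- Both A and B sort P in place in Python; the equivalence proved here is about the return value.

-- ===== PORT A =====
def Psum (P : List Int) : List Int :=
  let S := PySem.List.sorted P (fun x => x) false
  if S.length = 1 then [0]
  else
    (PySem.List.pyRange 2 ((S.length : Int) + 1) 1).foldl
      (fun result i => result ++ [(PySem.List.slice S none (some i)).sum]) []

-- ===== PORT B =====
def psumGo (acc : Int) : List Int → List Int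
  | [] => []
  | x :: r => (acc + x) :: psumGo (acc + x) r

def Psum_alt (P : List Int) : List Int :=
  let S := PySem.List.sorted P (fun x => x) false
  if S.length = 1 then [0]
  else
    match S with
    | [] => []
    | h :: t => psumGo h t

-- ===== PRECONDITION & SPEC =====
def Spec_Psum (P : List Int) (out : List Int) : Prop := out = Psum_alt P
instance (P : List Int) (out : List Int) : Decidable (Spec_Psum P out) := by unfold Spec_Psum; infer_instance

-- ===== CLAIM (what is proved, stated in full; the proofs are below) =====
def Claim_equal_Psum : Prop := ∀ (P : List Int), Dom_Psum P → Spec_Psum P (Psum P)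

-- ===== LEMMAS AND PROOFS =====

lemma psumGo_eq_map (t : List Int) (acc : Int) :
    psumGo acc t = (List.range t.length).map (fun k => acc + (t.take (k + 1)).sum) := by
  induction t generalizing acc with
  | nil => simp [psumGo]
  | cons x r ih =>
      simp [psumGo, ih (acc + x), List.range_succ_eq_map, List.map_map, Function.comp,
        add_assoc]

lemma psum_A_eq_map (S : List Int) :
    (PySem.List.pyRange 2 ((S.length : Int) + 1) 1).foldl
        (fun result i => result ++ [(PySem.List.slice S none (some i)).sum]) []
      = (List.range (S.length - 1)).map (fun k => (S.take (k + 2)).sum) := by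
  rw [PySem.List.foldl_append_singleton_eq_map, PySem.List.pyRange_one]
  have hn : (((S.length : Int) + 1 - 2)).toNat = S.length - 1 := by omega
  rw [hn]
  simp only [List.nil_append]
  rw [List.map_map]
  apply List.map_congr_left
  intro k hk
  simp only [Function.comp]
  have : PySem.List.slice S none (some ((2 : Int) + (k : Int))) = S.take (k + 2) := by
    have h2 : ((2 : Int) + (k : Int)) = ((k + 2 : ℕ) : Int) := by push_cast; ring
    rw [h2, PySem.List.slice_to_natCast]
  simp [this]

-- ===== VERDICT (by name: the statement is the Claim_ definition above) =====
theorem Psum_spec : Claim_equal_Psum := by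
  intro P _
  unfold Spec_Psum Psum Psum_alt
  set S := PySem.List.sorted P (fun x => x) false with hS
  by_cases h1 : S.length = 1
  · simp [h1]
  · simp only [h1, if_false]
    cases S with
    | nil => simp
    | cons h t =>
        rw [psum_A_eq_map]
        show _ = psumGo h t
        rw [psumGo_eq_map]
        simp only [List.length_cons, Nat.add_sub_cancel]
        apply List.map_congr_left
        intro k _
        simp [List.take_succ_cons, List.sum_cons]
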